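-- pv_equiv track=rewrite | github.com/yeeunli/programmers-coding-test | Python3/프로그래머스/0/181898. 가까운 1 찾기/가까운 1 찾기.py | solution
-- ===== SOURCE A (Python) =====
-- def solution(arr, idx):
--     answer = []
--
--     for i in range(len(arr)):
--         if arr[i] == 1 and idx <= i:
--             answer.append(i)
--
--     if len(answer) == 0:
--         answer.append(-1)
--
--     return sorted(answer)[0]
-- ===== SOURCE B (Python) =====
-- def solution(arr, idx):
--     for i, v in enumerate(arr):
--         if v == 1 and idx <= i:
--             return i
--     return -1
-- ===== Notes on version B (the rewrite author's own statement) =====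
-- stated objective: simpler
-- what changed: Replaced A's collect-all-matches-into-a-list-then-sort-and-take-first with a single short-circuiting scan over enumerate(arr) that returns the first qualifying index directly (-1 if none).
import Mathlib
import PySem

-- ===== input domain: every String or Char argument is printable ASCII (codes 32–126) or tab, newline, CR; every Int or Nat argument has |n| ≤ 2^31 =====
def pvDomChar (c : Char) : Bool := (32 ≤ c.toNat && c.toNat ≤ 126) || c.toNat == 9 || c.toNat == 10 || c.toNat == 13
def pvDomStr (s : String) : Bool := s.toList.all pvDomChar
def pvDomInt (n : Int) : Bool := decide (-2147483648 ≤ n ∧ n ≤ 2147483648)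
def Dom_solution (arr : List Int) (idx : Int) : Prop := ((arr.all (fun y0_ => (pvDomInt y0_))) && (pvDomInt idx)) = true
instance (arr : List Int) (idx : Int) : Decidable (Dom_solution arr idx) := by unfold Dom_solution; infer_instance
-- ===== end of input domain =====

-- B replaces A's collect-then-sort-then-take-first with a single short-circuiting scan (objective: simpler).

-- ===== PORT A =====
-- answer accumulated by the range-loop; then sorted(answer)[0] (answer is never empty at that point,
-- so the [0] index is ported with pyGetD, default never used)
def solution (arr : List Int) (idx : Int) : Int :=
  let answer := (PySem.List.pyRange 0 arr.length 1).foldl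
    (fun acc i => if PySem.List.pyGetD arr i 0 = 1 ∧ idx ≤ i then acc ++ [i] else acc) []
  let answer := if answer.length = 0 then answer ++ [-1] else answer
  PySem.List.pyGetD (PySem.List.sorted answer (fun x => x) false) 0 0

-- ===== PORT B =====
-- the for-loop over enumerate(arr) with an early return
def solutionAltGo (idx : Int) : List (Int × Int) → Int
  | [] => -1
  | (i, v) :: t => if v = 1 ∧ idx ≤ i then i else solutionAltGo idx t

def solution_alt (arr : List Int) (idx : Int) : Int :=
  solutionAltGo idx (PySem.List.enumerate arr 0)

-- ===== PRECONDITION & SPEC =====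
def Spec_solution (arr : List Int) (idx : Int) (out : Int) : Prop := out = solution_alt arr idx
instance (arr : List Int) (idx : Int) (out : Int) : Decidable (Spec_solution arr idx out) := by unfold Spec_solution; infer_instance

-- ===== CLAIM (what is proved, stated in full; the proofs are below) =====
def Claim_equal_solution : Prop := ∀ (arr : List Int) (idx : Int), Dom_solution arr idx → Spec_solution arr idx (solution arr idx)

-- ===== LEMMAS AND PROOFS =====

-- A's foldl appends exactly the first components of the matching enumerate pairs, in order
theorem pvFoldl_eq_filterMap (idx : Int) (L : List (Int × Int)) (acc : List Int) :
    L.foldl (fun acc p => if p.2 = 1 ∧ idx ≤ p.1 then acc ++ [p.1] else acc) acc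
      = acc ++ (L.filter (fun p => decide (p.2 = 1 ∧ idx ≤ p.1))).map (·.1) := by
  induction L generalizing acc with
  | nil => simp
  | cons h t ih =>
    by_cases hc : h.2 = 1 ∧ idx ≤ h.1 <;> simp [List.foldl_cons, hc, ih]

-- B's scan is: first component of the first matching pair, -1 if none
theorem pvGo_eq_head (idx : Int) (L : List (Int × Int)) :
    solutionAltGo idx L
      = match (L.filter (fun p => decide (p.2 = 1 ∧ idx ≤ p.1))).head? with
        | some p => p.1
        | none => -1 := by
  induction L with
  | nil => rfl
  | cons h t ih =>
    by_cases hc : h.2 = 1 ∧ idx ≤ h.1 <;> simp [solutionAltGo, hc, ih]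

-- the range-loop of A, re-read as a filter of the enumerated list
theorem pvA_loop (arr : List Int) (idx : Int) :
    (PySem.List.pyRange 0 (arr.length : Int) 1).foldl
        (fun acc i => if PySem.List.pyGetD arr i 0 = 1 ∧ idx ≤ i then acc ++ [i] else acc) []
      = ((PySem.List.enumerate arr 0).filter (fun p => decide (p.2 = 1 ∧ idx ≤ p.1))).map (·.1) := by
  have h := pvFoldl_eq_filterMap idx (PySem.List.enumerate arr 0) []
  conv at h => lhs; rw [PySem.List.enumerate_eq_map_pyRange arr 0, List.foldl_map]
  simpa using h

-- ===== VERDICT (by name: the statement is the Claim_ definition above) =====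
theorem solution_spec : Claim_equal_solution := by
  intro arr idx _
  unfold Spec_solution solution solution_alt
  rw [pvA_loop, pvGo_eq_head]
  cases hcase : (PySem.List.enumerate arr 0).filter (fun p => decide (p.2 = 1 ∧ idx ≤ p.1)) with
  | nil => decide
  | cons p t =>
    have hpw : ((p :: t).map (·.1)).Pairwise (fun a b : Int => a ≤ b) := by
      rw [← hcase]
      refine List.Pairwise.map _ (fun a b h => le_of_lt h) ?_
      exact (PySem.List.pairwise_lt_enumerate arr 0).sublist (List.filter_sublist)
    simp only [List.map_cons, List.length_cons, Nat.succ_ne_zero, if_false]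
    rw [PySem.List.sorted_eq_self_of_pairwise _ _ (by simpa using hpw)]
    simp [PySem.List.pyGetD_zero_cons]
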